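-- pv_equiv track=rewrite | github.com/AlexandrWeber/Projet_RI | requetesCorpus.py | filter_keywords
-- ===== SOURCE A (Python) =====
-- def filter_keywords(keywords):
--         """
--        Les opérateurs +,-, 0 sont la base de la répartition des mots de la requête en listes séparées.
--         Arguments:
--             La liste des mots-clés
--         Renvoie:
--             La liste des mots-clés sans les opérateurs
--             Le dictionnaire avec les mots-clés: clé : un des opérateurs, valeur : liste des mots de la requête correspondants à cet opérateur
--         """
--
--         keywords_gr = {"P":[], "A":[], "O":[]}
--         for word in keywords:
--             if word.startswith("+"): keywords_gr["P"].append(word[1:])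
--             elif word.startswith("-"): keywords_gr["A"].append(word[1:])
--             else: keywords_gr["O"].append(word)
--
--         keywords_clean = [kw for lkw in keywords_gr.values() for kw in lkw]
--         return keywords_clean, keywords_gr
-- ===== SOURCE B (Python) =====
-- def filter_keywords(keywords):
--     """Same result as A, built from three independent filtering passes instead of one bucketing loop."""
--     P = [w[1:] for w in keywords if w.startswith("+")]
--     A = [w[1:] for w in keywords if w.startswith("-")]
--     O = [w for w in keywords if not w.startswith("+") and not w.startswith("-")]
--     return P + A + O, {"P": P, "A": A, "O": O}
-- ===== Notes on version B (the rewrite author's own statement) =====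
-- stated objective: simpler
-- what changed: Replaces the single mutating bucket loop over a prebuilt dict with three independent filter passes (P, A, O) whose results are assembled directly into the dict and concatenated for the clean list.
import Mathlib
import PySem

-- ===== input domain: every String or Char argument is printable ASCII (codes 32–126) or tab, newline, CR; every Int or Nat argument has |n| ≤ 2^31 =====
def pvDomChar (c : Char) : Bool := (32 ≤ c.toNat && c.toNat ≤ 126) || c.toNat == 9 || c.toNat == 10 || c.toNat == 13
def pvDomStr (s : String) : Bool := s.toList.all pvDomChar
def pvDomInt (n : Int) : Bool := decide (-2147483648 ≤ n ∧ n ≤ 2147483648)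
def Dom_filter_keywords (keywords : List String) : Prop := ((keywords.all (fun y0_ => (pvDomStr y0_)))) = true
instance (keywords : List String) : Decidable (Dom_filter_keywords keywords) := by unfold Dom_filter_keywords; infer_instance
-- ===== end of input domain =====

-- ===== PORT A =====
-- Port of A: one loop appending each word into a prebuilt 3-key dict, then flatten its values.
def filter_keywords (keywords : List String) : List String × (List (String × List String)) :=
  let gr0 : PySem.Dict String (List String) := PySem.Dict.ofList [("P", []), ("A", []), ("O", [])]
  let gr := keywords.foldl (fun d w =>
    if PySem.Str.startswith w "+" then d.modify "P" [] (fun l => l ++ [PySem.Str.slice w (some 1) none])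
    else if PySem.Str.startswith w "-" then d.modify "A" [] (fun l => l ++ [PySem.Str.slice w (some 1) none])
    else d.modify "O" [] (fun l => l ++ [w])) gr0
  let keywords_clean := (PySem.Dict.values gr).flatMap (fun lkw => lkw)
  (keywords_clean, gr.items)

-- ===== PORT B =====
-- Port of B: three independent filter passes, dict assembled directly; simpler decomposition, no mutation.
def filter_keywords_alt (keywords : List String) : List String × (List (String × List String)) :=
  let P := (keywords.filter (fun w => PySem.Str.startswith w "+")).map (fun w => PySem.Str.slice w (some 1) none)
  let A := (keywords.filter (fun w => PySem.Str.startswith w "-")).map (fun w => PySem.Str.slice w (some 1) none)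
  let O := keywords.filter (fun w => !PySem.Str.startswith w "+" && !PySem.Str.startswith w "-")
  (P ++ A ++ O, [("P", P), ("A", A), ("O", O)])

-- ===== PRECONDITION & SPEC =====
def Spec_filter_keywords (keywords : List String) (out : List String × (List (String × List String))) : Prop := out = filter_keywords_alt keywords
instance (keywords : List String) (out : List String × (List (String × List String))) : Decidable (Spec_filter_keywords keywords out) := by unfold Spec_filter_keywords; infer_instance

-- ===== CLAIM (what is proved, stated in full; the proofs are below) =====
def Claim_equal_filter_keywords : Prop := ∀ (keywords : List String), Dom_filter_keywords keywords → Spec_filter_keywords keywords (filter_keywords keywords)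

-- ===== LEMMAS AND PROOFS =====

-- ===== VERDICT (by name: the statement is the Claim_ definition above) =====
-- A word starting with '+' does not start with '-'.
theorem plus_not_minus (l : List Char) (h : PySem.Chars.startswith l ['+'] = true) :
    PySem.Chars.startswith l ['-'] = false := by
  rw [PySem.Chars.startswith_iff] at h
  obtain ⟨t, rfl⟩ := h
  rw [Bool.eq_false_iff]
  intro hc
  rw [PySem.Chars.startswith_iff] at hc
  simp [List.cons_prefix_cons] at hc

-- One modify step on the literal 3-key dict appends to the named bucket.
theorem step_P (p a o x : List String) :
    (PySem.Dict.mk [("P", p), ("A", a), ("O", o)]).modify "P" [] (fun l => l ++ x) =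
    PySem.Dict.mk [("P", p ++ x), ("A", a), ("O", o)] := by
  simp [PySem.Dict.modify, PySem.Dict.insert, PySem.Dict.getD, PySem.Dict.get?,
        PySem.Dict.contains, List.find?]

theorem step_A (p a o x : List String) :
    (PySem.Dict.mk [("P", p), ("A", a), ("O", o)]).modify "A" [] (fun l => l ++ x) =
    PySem.Dict.mk [("P", p), ("A", a ++ x), ("O", o)] := by
  simp [PySem.Dict.modify, PySem.Dict.insert, PySem.Dict.getD, PySem.Dict.get?,
        PySem.Dict.contains, List.find?]

theorem step_O (p a o x : List String) :
    (PySem.Dict.mk [("P", p), ("A", a), ("O", o)]).modify "O" [] (fun l => l ++ x) =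
    PySem.Dict.mk [("P", p), ("A", a), ("O", o ++ x)] := by
  simp [PySem.Dict.modify, PySem.Dict.insert, PySem.Dict.getD, PySem.Dict.get?,
        PySem.Dict.contains, List.find?]

-- The fold over the literal 3-key dict just appends to each bucket.
theorem fold_items (ks : List String) (p a o : List String) :
    (ks.foldl (fun d w =>
      if PySem.Str.startswith w "+" then d.modify "P" [] (fun l => l ++ [PySem.Str.slice w (some 1) none])
      else if PySem.Str.startswith w "-" then d.modify "A" [] (fun l => l ++ [PySem.Str.slice w (some 1) none])
      else d.modify "O" [] (fun l => l ++ [w])) (PySem.Dict.mk [("P", p), ("A", a), ("O", o)])) =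
    PySem.Dict.mk [("P", p ++ (ks.filter (fun w => PySem.Str.startswith w "+")).map (fun w => PySem.Str.slice w (some 1) none)),
                   ("A", a ++ (ks.filter (fun w => PySem.Str.startswith w "-")).map (fun w => PySem.Str.slice w (some 1) none)),
                   ("O", o ++ ks.filter (fun w => !PySem.Str.startswith w "+" && !PySem.Str.startswith w "-"))] := by
  induction ks generalizing p a o with
  | nil => simp
  | cons w ks ih =>
    by_cases hp : PySem.Str.startswith w "+"
    · simp only [List.foldl_cons, hp, if_true, step_P]
      rw [ih]
      simp only [PySem.Str.startswith] at hp
      have hm := plus_not_minus _ hp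
      simp_all [List.filter_cons, PySem.Str.startswith]
    · by_cases hm : PySem.Str.startswith w "-"
      · simp only [List.foldl_cons, hp, hm, if_true, Bool.false_eq_true, if_false, step_A]
        rw [ih]
        simp_all [List.filter_cons, PySem.Str.startswith]
      · simp only [List.foldl_cons, hp, hm, Bool.false_eq_true, if_false, step_O]
        rw [ih]
        simp_all [List.filter_cons, PySem.Str.startswith]

theorem filter_keywords_spec : Claim_equal_filter_keywords := by
  intro keywords _
  show filter_keywords keywords = filter_keywords_alt keywords
  unfold filter_keywords filter_keywords_alt
  dsimp only
  have e : (PySem.Dict.ofList [("P", ([] : List String)), ("A", []), ("O", [])]) =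
      PySem.Dict.mk [("P", []), ("A", []), ("O", [])] := by decide
  rw [e, fold_items keywords [] [] []]
  simp [PySem.Dict.values, PySem.Dict.items]
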